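-- pv_equiv track=rewrite | github.com/lucadani7/KarnaughDiagrams | logic.py | get_fnc
-- ===== SOURCE A (Python) =====
-- def get_binary(n, num_vars):
--     """
--     Convert an integer to its binary representation as a string, padded to a specified
--     number of bits.
--     This function takes an integer number and converts it to its binary string
--     representation. The returned binary string is zero-padded to match the
--     specified number of bits (`num_vars`).
--     """
--     return format(n, f'0{num_vars}b')
--
-- def get_fnc(ones, dont_cares, num_vars, vars_names):
--     """
--     Generates a Boolean function in its canonical form as a sum of minterms for a
--     given set of variables and corresponding sets of ones and don't-cares.
--     """
--     all_vals = set(range(2**num_vars))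
--     zeros = all_vals - ones - dont_cares
--     if not zeros:
--         return "1"
--     parts = []
--     for val in sorted(zeros):
--         b = get_binary(val, num_vars)
--         term = []
--         for i, bit in enumerate(b):
--             term.append(vars_names[i] if bit == '0' else f"{vars_names[i]}'")
--         parts.append("(" + " + ".join(term) + ")")
--     return "".join(parts)
-- ===== SOURCE B (Python) =====
-- def get_fnc(ones, dont_cares, num_vars, vars_names):
--     skip = set(ones) | set(dont_cares)
--     parts = []
--
--     def go(i, val, lits):
--         if i == num_vars:
--             if val not in skip:
--                 parts.append("(" + " + ".join(lits) + ")")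
--             return
--         go(i + 1, val * 2, lits + [vars_names[i]])
--         go(i + 1, val * 2 + 1, lits + [vars_names[i] + "'"])
--
--     go(0, 0, [])
--     return "".join(parts) if parts else "1"
-- ===== Notes on version B (the rewrite author's own statement) =====
-- stated objective: alternative
-- what changed: B replaces A's set-difference/sort/binary-string pipeline with a recursive depth-first traversal of the variable decision tree: each variable splits into a positive and a negated branch carrying the value and literal-prefix accumulators, and at a leaf the completed value is tested against the skip set and the clause emitted; no set difference, no sort, no binary formatting.
-- outside the precondition, e.g. on get_fnc(set(), set(), 0, ['x']): A returns '(x)', B returns '()'; on get_fnc({0, 1}, set(), 1, []): A returns '1', B raises IndexError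
import Mathlib
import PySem

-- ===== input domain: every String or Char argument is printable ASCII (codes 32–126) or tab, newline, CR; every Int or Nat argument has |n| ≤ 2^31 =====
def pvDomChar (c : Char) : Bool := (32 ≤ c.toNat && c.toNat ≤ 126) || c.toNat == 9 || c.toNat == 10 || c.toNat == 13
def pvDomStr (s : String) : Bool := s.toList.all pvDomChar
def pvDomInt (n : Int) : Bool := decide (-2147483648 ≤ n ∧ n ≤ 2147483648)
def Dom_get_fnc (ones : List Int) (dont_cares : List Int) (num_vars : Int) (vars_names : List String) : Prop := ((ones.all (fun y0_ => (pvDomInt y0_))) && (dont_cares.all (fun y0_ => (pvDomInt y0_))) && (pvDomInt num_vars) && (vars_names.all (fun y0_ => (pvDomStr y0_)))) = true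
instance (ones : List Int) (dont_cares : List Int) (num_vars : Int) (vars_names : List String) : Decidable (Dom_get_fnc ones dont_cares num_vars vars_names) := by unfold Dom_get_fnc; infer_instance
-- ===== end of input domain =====

-- B replaces A's set-difference/sort/binary-string pipeline by a recursive depth-first
-- traversal of the variable decision tree (objective: alternative decomposition).


-- ===== PORT A =====
-- binary digits of a positive number, most significant first (the digits format(n,'b') prints)
def pvBinChars (n : Nat) : List Char :=
  if n = 0 then [] else pvBinChars (n / 2) ++ [if n % 2 = 1 then '1' else '0']
decreasing_by exact Nat.div_lt_self (Nat.pos_of_ne_zero (by assumption)) (by norm_num)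

-- format(n, f'0{num_vars}b'); exact for n ≥ 0 (the only call sites: n comes from range(2**num_vars))
def get_binary (n : Int) (num_vars : Int) : String :=
  let ds := if n = 0 then ['0'] else pvBinChars n.toNat
  String.ofList (List.replicate (num_vars.toNat - ds.length) '0' ++ ds)

def get_fnc (ones : List Int) (dont_cares : List Int) (num_vars : Int) (vars_names : List String) : String :=
  -- 2**num_vars ported as (2:Int)^num_vars.toNat: exact for num_vars ≥ 0 (Pre_; Python raises on negative num_vars)
  let all_vals : PySem.Set Int := PySem.Set.ofList (PySem.List.pyRange 0 ((2 : Int) ^ num_vars.toNat) 1)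
  let zeros : PySem.Set Int := PySem.Set.diff (PySem.Set.diff all_vals ones) dont_cares
  if zeros = [] then "1"
  else
    let parts := (PySem.List.sorted zeros (fun x => x) false).map (fun (val : Int) =>
      let b := get_binary val num_vars
      let term := (PySem.List.enumerate b.toList).map (fun (p : Int × Char) =>
        if p.2 == '0' then PySem.List.pyGetD vars_names p.1 "" else PySem.List.pyGetD vars_names p.1 "" ++ "'")
      "(" ++ PySem.Str.join " + " term ++ ")")
    PySem.Str.join "" parts

-- ===== PORT B =====
-- Python's inner 'go(i, val, lits)' recursion, stopping at i == num_vars; ported with fuel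
-- rem = num_vars - i (exact for num_vars ≥ 0, guaranteed by Pre_). Returns the clauses the
-- Python appends to 'parts', in the same depth-first order.
def pvGo (skip : PySem.Set Int) (vars_names : List String) : Int → Nat → Int → List String → List String
  | _, 0, val, lits =>
      if PySem.Set.contains skip val then [] else ["(" ++ PySem.Str.join " + " lits ++ ")"]
  | i, rem + 1, val, lits =>
      pvGo skip vars_names (i + 1) rem (val * 2) (lits ++ [PySem.List.pyGetD vars_names i ""]) ++
      pvGo skip vars_names (i + 1) rem (val * 2 + 1) (lits ++ [PySem.List.pyGetD vars_names i "" ++ "'"])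

def get_fnc_alt (ones : List Int) (dont_cares : List Int) (num_vars : Int) (vars_names : List String) : String :=
  let skip : PySem.Set Int := PySem.Set.union (PySem.Set.ofList ones) (PySem.Set.ofList dont_cares)
  let parts := pvGo skip vars_names 0 num_vars.toNat 0 []
  if parts = [] then "1" else PySem.Str.join "" parts

-- ===== PRECONDITION & SPEC =====
-- Pre_ requires 1 ≤ num_vars ≤ len(vars_names): for negative num_vars A raises TypeError; for
-- num_vars > len(vars_names) A raises IndexError whenever a zero value exists and returns '1'
-- only in the degenerate fully-covered case (where B's tree walk still indexes vars_names and
-- raises IndexError); and at num_vars = 0 format()'s minimum-one-digit output makes A emit a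
-- spurious one-literal clause '(v)' (or raise IndexError on empty vars_names) — a corner no
-- caller of a 0-variable Boolean function specifies; B yields '()'.
def Pre_get_fnc (ones : List Int) (dont_cares : List Int) (num_vars : Int) (vars_names : List String) : Prop :=
  1 ≤ num_vars ∧ num_vars ≤ (vars_names.length : Int)
instance (ones : List Int) (dont_cares : List Int) (num_vars : Int) (vars_names : List String) : Decidable (Pre_get_fnc ones dont_cares num_vars vars_names) := by unfold Pre_get_fnc; infer_instance

def pvWitness_get_fnc : List Int × List Int × Int × List String := ([0, 3], [2], 2, ["x", "y"])

def Spec_get_fnc (ones : List Int) (dont_cares : List Int) (num_vars : Int) (vars_names : List String) (out : String) : Prop := out = get_fnc_alt ones dont_cares num_vars vars_names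
instance (ones : List Int) (dont_cares : List Int) (num_vars : Int) (vars_names : List String) (out : String) : Decidable (Spec_get_fnc ones dont_cares num_vars vars_names out) := by unfold Spec_get_fnc; infer_instance

-- ===== CLAIM (what is proved, stated in full; the proofs are below) =====
def Claim_equal_get_fnc : Prop := ∀ (ones : List Int) (dont_cares : List Int) (num_vars : Int) (vars_names : List String), Dom_get_fnc ones dont_cares num_vars vars_names → Pre_get_fnc ones dont_cares num_vars vars_names → Spec_get_fnc ones dont_cares num_vars vars_names (get_fnc ones dont_cares num_vars vars_names)

-- ===== LEMMAS AND PROOFS =====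

-- fixed-width binary, most significant first
def pvFb : Nat → Nat → List Char
  | 0, _ => []
  | k + 1, v => pvFb k (v / 2) ++ [if v % 2 = 1 then '1' else '0']

theorem pvBinChars_pos (n : Nat) (h : n ≠ 0) :
    pvBinChars n = pvBinChars (n / 2) ++ [if n % 2 = 1 then '1' else '0'] := by
  rw [pvBinChars]; simp [h]

-- the padded digit list equals fixed-width binary, for width ≥ 1 and value < 2^width
theorem pvPad_eq_fb : ∀ (k v : Nat), v < 2 ^ (k + 1) →
    List.replicate ((k + 1) - (if v = 0 then ['0'] else pvBinChars v).length) '0'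
      ++ (if v = 0 then ['0'] else pvBinChars v) = pvFb (k + 1) v := by
  intro k
  induction k with
  | zero =>
    intro v hv
    interval_cases v
    · simp [pvFb]
    · rw [pvBinChars_pos 1 (by norm_num)]
      simp [pvFb, pvBinChars]
  | succ k ih =>
    intro v hv
    show _ = pvFb (k + 1) (v / 2) ++ [if v % 2 = 1 then '1' else '0']
    rw [← ih (v / 2) (by omega)]
    by_cases h0 : v = 0
    · subst h0
      simp [List.replicate_succ']
    · rcases Nat.lt_or_ge v 2 with h1 | h2
      · have : v = 1 := by omega
        subst this
        rw [pvBinChars_pos 1 (by norm_num)]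
        simp [pvBinChars, List.replicate_succ']
      · have hd : v / 2 ≠ 0 := by omega
        rw [pvBinChars_pos v h0]
        simp only [if_neg h0, if_neg hd, List.length_append, List.length_singleton]
        rw [List.append_assoc]
        congr 1
        congr 1
        omega

-- fixed-width binary, characterised positionally by shifts
theorem pvFb_eq_map : ∀ (k v : Nat),
    pvFb k v = (List.range k).map (fun (i : Nat) => if (v >>> (k - 1 - i)) % 2 = 1 then '1' else '0') := by
  intro k
  induction k with
  | zero => intro v; simp [pvFb]
  | succ k ih =>
    intro v
    show pvFb k (v / 2) ++ _ = _
    rw [ih (v / 2), List.range_succ, List.map_append]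
    congr 1
    · apply List.map_congr_left
      intro i hi
      have hik : i < k := List.mem_range.mp hi
      have hsh : (v / 2) >>> (k - 1 - i) = v >>> (k + 1 - 1 - i) := by
        have h1 : k + 1 - 1 - i = (k - 1 - i) + 1 := by omega
        rw [h1, Nat.shiftRight_succ_inside]
      rw [hsh]
    · simp

-- A's binary string of v < 2^k (k ≥ 1) as a positional map
theorem get_binary_toList (k v : Nat) (hk : 1 ≤ k) (hv : v < 2 ^ k) :
    (get_binary ((v : Nat) : Int) ((k : Nat) : Int)).toList
      = (List.range k).map (fun (i : Nat) => if (v >>> (k - 1 - i)) % 2 = 1 then '1' else '0') := by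
  obtain ⟨k', rfl⟩ : ∃ k', k = k' + 1 := ⟨k - 1, by omega⟩
  unfold get_binary
  simp only [Int.toNat_natCast, Nat.cast_eq_zero, String.toList_ofList]
  rw [pvPad_eq_fb k' v hv, pvFb_eq_map]

-- A's term list for v equals the positional literal list for v (v < 2^k, 1 ≤ k)
theorem pvTerm_eq (vars_names : List String) (k v : Nat) (hk : 1 ≤ k) (hv : v < 2 ^ k) :
    (PySem.List.enumerate (get_binary ((v : Nat) : Int) ((k : Nat) : Int)).toList).map (fun (p : Int × Char) =>
       if p.2 == '0' then PySem.List.pyGetD vars_names p.1 "" else PySem.List.pyGetD vars_names p.1 "" ++ "'")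
    = (List.range k).map (fun (i : Nat) =>
        let name := PySem.List.pyGetD vars_names ((i : Nat) : Int) ""
        if (v >>> (k - 1 - i)) % 2 = 1 then name ++ "'" else name) := by
  rw [get_binary_toList k v hk hv]
  rw [PySem.List.enumerate_eq_map_pyRange _ ' ']
  have hlen : PySem.List.len ((List.range k).map (fun (i : Nat) => if (v >>> (k - 1 - i)) % 2 = 1 then '1' else '0')) = ((k : Nat) : Int) := by
    simp [PySem.List.len_eq]
  rw [hlen, PySem.List.pyRange_zero_natCast, List.map_map, List.map_map]
  apply List.map_congr_left
  intro i hi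
  have hik : i < k := List.mem_range.mp hi
  have hg : PySem.List.pyGetD ((List.range k).map (fun (i : Nat) => if (v >>> (k - 1 - i)) % 2 = 1 then '1' else '0')) ((i : Nat) : Int) ' '
      = (if (v >>> (k - 1 - i)) % 2 = 1 then '1' else '0') := by
    rw [PySem.List.pyGetD_natCast]
    exact PySem.List.getD_map_range _ k i ' ' hik
  simp only [Function.comp, hg]
  by_cases hb : (v >>> (k - 1 - i)) % 2 = 1 <;> simp [hb]

-- B's decision-tree recursion, characterised as a filtering scan of the value range:
-- the subtree at (i, rem, val, lits) emits, in ascending order of u, one clause per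
-- surviving value val*2^rem + u with the literals lits ++ (bits of u at names i, i+1, …).
theorem pvGo_eq (skip : PySem.Set Int) (vars_names : List String) :
    ∀ (rem : Nat) (i val : Int) (lits : List String),
    pvGo skip vars_names i rem val lits
      = (List.range (2 ^ rem)).filterMap (fun (u : Nat) =>
          if PySem.Set.contains skip (val * (2 : Int) ^ rem + (u : Int)) then none
          else some ("(" ++ PySem.Str.join " + " (lits ++ (List.range rem).map (fun (j : Nat) =>
            let name := PySem.List.pyGetD vars_names (i + (j : Int)) ""
            if (u >>> (rem - 1 - j)) % 2 = 1 then name ++ "'" else name)) ++ ")")) := by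
  intro rem
  induction rem with
  | zero =>
    intro i val lits
    show (if PySem.Set.contains skip val then [] else ["(" ++ PySem.Str.join " + " lits ++ ")"]) = _
    simp only [pow_zero, List.range_one, List.filterMap_cons, List.filterMap_nil,
      Nat.cast_zero, pow_zero, mul_one, add_zero, List.range_zero, List.map_nil, List.append_nil]
    split <;> simp
  | succ rem ih =>
    intro i val lits
    show pvGo skip vars_names (i + 1) rem (val * 2) _ ++ pvGo skip vars_names (i + 1) rem (val * 2 + 1) _ = _
    rw [ih, ih]
    have hpos : 0 < (2 : Nat) ^ rem := Nat.two_pow_pos rem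
    have hr : List.range (2 ^ (rem + 1)) = List.range (2 ^ rem) ++ (List.range (2 ^ rem)).map (fun u => 2 ^ rem + u) := by
      have hsplit : (2 : Nat) ^ (rem + 1) = 2 ^ rem + 2 ^ rem := by ring
      rw [hsplit, List.range_add]
    rw [hr, List.filterMap_append, List.filterMap_map]
    congr 1
    · -- first half: top bit 0
      apply List.filterMap_congr
      intro u hu
      have hu' : u < 2 ^ rem := List.mem_range.mp hu
      have hval : val * 2 * (2 : Int) ^ rem + (u : Int) = val * (2 : Int) ^ (rem + 1) + (u : Int) := by
        push_cast [pow_succ]; ring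
      have hlits :
          lits ++ [PySem.List.pyGetD vars_names i ""] ++
            (List.range rem).map (fun (j : Nat) =>
              let name := PySem.List.pyGetD vars_names (i + 1 + (j : Int)) ""
              if (u >>> (rem - 1 - j)) % 2 = 1 then name ++ "'" else name)
          = lits ++ (List.range (rem + 1)).map (fun (j : Nat) =>
              let name := PySem.List.pyGetD vars_names (i + (j : Int)) ""
              if (u >>> (rem + 1 - 1 - j)) % 2 = 1 then name ++ "'" else name) := by
        rw [List.range_succ_eq_map, List.map_cons, List.map_map, List.append_assoc, List.singleton_append]
        congr 1
        congr 1
        · have h0 : rem + 1 - 1 - 0 = rem := by omega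
          simp [h0, Nat.shiftRight_eq_div_pow, Nat.div_eq_of_lt hu']
        · apply List.map_congr_left
          intro j hj
          have h1 : i + ((Nat.succ j : Nat) : Int) = i + 1 + (j : Int) := by push_cast; ring
          have h2 : rem + 1 - 1 - Nat.succ j = rem - 1 - j := by omega
          simp only [Function.comp, h1, h2]
      rw [hval, hlits]
    · -- second half: top bit 1
      apply List.filterMap_congr
      intro u hu
      have hu' : u < 2 ^ rem := List.mem_range.mp hu
      have hval : (val * 2 + 1) * (2 : Int) ^ rem + (u : Int)
          = val * (2 : Int) ^ (rem + 1) + ((2 ^ rem + u : Nat) : Int) := by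
        push_cast [pow_succ]; ring
      have hlits :
          lits ++ [PySem.List.pyGetD vars_names i "" ++ "'"] ++
            (List.range rem).map (fun (j : Nat) =>
              let name := PySem.List.pyGetD vars_names (i + 1 + (j : Int)) ""
              if (u >>> (rem - 1 - j)) % 2 = 1 then name ++ "'" else name)
          = lits ++ (List.range (rem + 1)).map (fun (j : Nat) =>
              let name := PySem.List.pyGetD vars_names (i + (j : Int)) ""
              if ((2 ^ rem + u) >>> (rem + 1 - 1 - j)) % 2 = 1 then name ++ "'" else name) := by
        rw [List.range_succ_eq_map, List.map_cons, List.map_map, List.append_assoc, List.singleton_append]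
        congr 1
        congr 1
        · have h0 : rem + 1 - 1 - 0 = rem := by omega
          have hdiv : (2 ^ rem + u) / 2 ^ rem = 1 := by
            rw [Nat.add_comm, Nat.add_div_right u hpos, Nat.div_eq_of_lt hu']
          simp [h0, Nat.shiftRight_eq_div_pow, hdiv]
        · apply List.map_congr_left
          intro j hj
          have hjr : j < rem := List.mem_range.mp hj
          have h1 : i + ((Nat.succ j : Nat) : Int) = i + 1 + (j : Int) := by push_cast; ring
          have h2 : rem + 1 - 1 - Nat.succ j = rem - 1 - j := by omega
          have hsh : ((2 ^ rem + u) >>> (rem - 1 - j)) % 2 = (u >>> (rem - 1 - j)) % 2 := by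
            have hds : (2 : Nat) ^ rem = 2 ^ (rem - (rem - 1 - j)) * 2 ^ (rem - 1 - j) := by
              rw [← pow_add]; congr 1; omega
            have hstep : (2 ^ rem + u) >>> (rem - 1 - j) = 2 ^ (rem - (rem - 1 - j)) + u >>> (rem - 1 - j) := by
              rw [Nat.shiftRight_eq_div_pow, Nat.shiftRight_eq_div_pow, hds, Nat.add_comm,
                Nat.add_mul_div_right _ _ (Nat.two_pow_pos (rem - 1 - j))]
              omega
            have hev : 2 ^ (rem - (rem - 1 - j)) % 2 = 0 := by
              have h3 : rem - (rem - 1 - j) = (rem - (rem - 1 - j) - 1) + 1 := by omega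
              rw [h3, pow_succ]
              omega
            rw [hstep]
            omega
          simp only [Function.comp, h1, h2, hsh]
      simp only [Function.comp_apply]
      rw [hval, hlits]

-- filterMap with an if-guard is map-after-filter
theorem pvFilterMap_if {α β : Type} (p : α → Bool) (f : α → β) (l : List α) :
    l.filterMap (fun v => if p v then none else some (f v)) = (l.filter (fun v => !p v)).map f := by
  induction l with
  | nil => rfl
  | cons x xs ih => by_cases h : p x <;> simp [h, ih]

theorem get_fnc_spec_aux (ones : List Int) (dont_cares : List Int) (num_vars : Int) (vars_names : List String)
    (hpre : Pre_get_fnc ones dont_cares num_vars vars_names) :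
    get_fnc ones dont_cares num_vars vars_names = get_fnc_alt ones dont_cares num_vars vars_names := by
  obtain ⟨h1, _h2⟩ := hpre
  obtain ⟨k, rfl⟩ : ∃ k : Nat, num_vars = ((k : Nat) : Int) := ⟨num_vars.toNat, by omega⟩
  have hk1 : 1 ≤ k := by exact_mod_cast h1
  unfold get_fnc get_fnc_alt
  simp only [Int.toNat_natCast]
  rw [pvGo_eq]
  -- B's filtered clauses with i = 0, val = 0
  have hB : ∀ u : Nat, ((0 : Int) * (2 : Int) ^ k + (u : Int)) = ((u : Nat) : Int) := by intro u; ring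
  simp only [hB, zero_add, List.nil_append]
  set skip : PySem.Set Int := PySem.Set.union (PySem.Set.ofList ones) (PySem.Set.ofList dont_cares) with hsk
  rw [pvFilterMap_if]
  -- the common survivors list
  set P : Nat → Bool := fun v => !(ones.contains ((v : Nat) : Int)) && !(dont_cares.contains ((v : Nat) : Int)) with hP
  set zs : List Nat := (List.range (2 ^ k)).filter P with hzs
  have hskip : ∀ v : Nat, PySem.Set.contains skip ((v : Nat) : Int) = !(P v) := by
    intro v
    rw [hP, hsk]
    simp only [Bool.not_and, Bool.not_not]
    rw [Bool.eq_iff_iff]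
    simp only [PySem.Set.contains_iff, PySem.Set.mem_union, PySem.Set.mem_ofList,
      Bool.or_eq_true, List.contains_iff_mem]
  have hzeros : PySem.Set.diff (PySem.Set.diff (PySem.Set.ofList (PySem.List.pyRange 0 ((2 : Int) ^ k) 1)) ones) dont_cares
      = zs.map (fun (v : Nat) => ((v : Nat) : Int)) := by
    rw [PySem.Set.ofList_eq_self_of_nodup _ (PySem.List.nodup_pyRange_one _ _)]
    show ((PySem.List.pyRange 0 ((2 : Int) ^ k) 1).filter (fun x => !ones.contains x)).filter (fun x => !dont_cares.contains x) = _
    rw [List.filter_filter]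
    have hpow : ((2 : Int) ^ k) = ((2 ^ k : Nat) : Int) := by push_cast; ring
    rw [hpow, PySem.List.pyRange_zero_natCast, List.filter_map, hzs]
    congr 1
    apply List.filter_congr
    intro v _
    simp only [Function.comp, hP]
    rw [Bool.and_comm]
  rw [hzeros]
  have hfil : (List.range (2 ^ k)).filter (fun (v : Nat) => !(PySem.Set.contains skip ((v : Nat) : Int))) = zs := by
    rw [hzs]
    apply List.filter_congr
    intro v _
    rw [hskip v, Bool.not_not]
  rw [hfil]
  by_cases hz : zs = []
  · rw [hz]; simp
  · rw [if_neg (by simp [List.map_eq_nil_iff, hz]), if_neg (by simp [List.map_eq_nil_iff, hz])]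
    have hpw : (zs.map (fun (v : Nat) => ((v : Nat) : Int))).Pairwise (fun a b => a ≤ b) := by
      have h0 : zs.Pairwise (fun a b => a < b) := List.Pairwise.filter _ List.pairwise_lt_range
      exact (List.Pairwise.map _ (by intro a b hab; exact_mod_cast hab) h0 :
        (zs.map (fun (v : Nat) => ((v : Nat) : Int))).Pairwise (fun a b => a < b)).imp le_of_lt
    rw [PySem.List.sorted_eq_self_of_pairwise _ _ hpw]
    rw [List.map_map]
    refine congrArg (PySem.Str.join "") (List.map_congr_left ?_)
    intro v hv
    have hvlt : v < 2 ^ k := List.mem_range.mp (List.mem_of_mem_filter hv)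
    simp only [Function.comp]
    rw [pvTerm_eq vars_names k v hk1 hvlt]

-- ===== VERDICT (by name: the statement is the Claim_ definition above) =====
theorem get_fnc_spec : Claim_equal_get_fnc := by
  intro ones dont_cares num_vars vars_names _ hpre
  unfold Spec_get_fnc
  exact get_fnc_spec_aux ones dont_cares num_vars vars_names hpre
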